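-- pv_equiv track=rewrite | github.com/openssl-sg-insights/schematic | schematic/scripts/get_dependencies.py | rearrange_topological_gen
-- ===== SOURCE A (Python) =====
-- def rearrange_topological_gen(component_layers_copy_copy, component_layers, topological_gen, figure_type):
--     '''
--     Reorder components within the topological_generations to match
--     how they were ordered in component_layers_copy_copy
--     '''
--     if figure_type == 'all':
--         for key, i in component_layers_copy_copy.items():
--             if key not in topological_gen[i]:
--                 topological_gen[i].append(key)
--                 topological_gen[component_layers[key]].remove(key)
--     elif figure_type == 'component_only':
--         try:
--             for key, i in component_layers_copy_copy.items():
--                 # add additional space for conditional dependencies.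
--                 if i > len(topological_gen) - 1:
--                     topological_gen.append([key])
--                     topological_gen[component_layers[key]].remove(key)
--                 elif key not in topological_gen[i]:
--                     topological_gen[i].append(key)
--                     topological_gen[component_layers[key]].remove(key)
--         except:
--             breakpoint()
--
--     return topological_gen
-- ===== SOURCE B (Python) =====
-- def rearrange_topological_gen(component_layers_copy_copy, component_layers, topological_gen, figure_type):
--     '''
--     Reorder components within the topological generations to match
--     component_layers_copy_copy: plan all moves in one pass over the
--     dict, then rebuild every layer once with a set-based filter.
--     Returns a fresh list (does not mutate topological_gen).
--     '''
--     if figure_type not in ('all', 'component_only'):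
--         return topological_gen
--     grow = figure_type == 'component_only'
--     n = len(topological_gen)
--     members = [set(layer) for layer in topological_gen]
--     moved = [set() for _ in range(n)]   # keys leaving layer p
--     added = [[] for _ in range(n)]      # keys appended to layer p, in dict order
--     extra = []                          # layers appended past the end
--     for key, i in component_layers_copy_copy.items():
--         if grow and i >= n + len(extra):
--             extra.append([key])
--             moved[component_layers[key]].add(key)
--         elif not (i < n and key in members[i]):
--             if i < n:
--                 added[i].append(key)
--             else:
--                 extra[i - n].append(key)
--             moved[component_layers[key]].add(key)
--     return [[x for x in topological_gen[p] if x not in moved[p]] + added[p]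
--             for p in range(n)] + extra
-- ===== Notes on version B (the rewrite author's own statement) =====
-- stated objective: alternative
-- what changed: Instead of mutating topological_gen in place with per-key list membership tests and list.remove scans, B plans all moves in one pass over the dict (per-layer 'moved' sets and 'added' lists) and then rebuilds every layer once with a set-based filter, returning a fresh list; …
-- outside the precondition, e.g. on rearrange_topological_gen({'a': 0}, {'a': 0}, [['b']], 'all'): A returns [['b']], B returns [['b', 'a']]; on rearrange_topological_gen({'a': -1}, {}, [['a']], 'all'): A returns [['a']], B returns [['a']]
import Mathlib
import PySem

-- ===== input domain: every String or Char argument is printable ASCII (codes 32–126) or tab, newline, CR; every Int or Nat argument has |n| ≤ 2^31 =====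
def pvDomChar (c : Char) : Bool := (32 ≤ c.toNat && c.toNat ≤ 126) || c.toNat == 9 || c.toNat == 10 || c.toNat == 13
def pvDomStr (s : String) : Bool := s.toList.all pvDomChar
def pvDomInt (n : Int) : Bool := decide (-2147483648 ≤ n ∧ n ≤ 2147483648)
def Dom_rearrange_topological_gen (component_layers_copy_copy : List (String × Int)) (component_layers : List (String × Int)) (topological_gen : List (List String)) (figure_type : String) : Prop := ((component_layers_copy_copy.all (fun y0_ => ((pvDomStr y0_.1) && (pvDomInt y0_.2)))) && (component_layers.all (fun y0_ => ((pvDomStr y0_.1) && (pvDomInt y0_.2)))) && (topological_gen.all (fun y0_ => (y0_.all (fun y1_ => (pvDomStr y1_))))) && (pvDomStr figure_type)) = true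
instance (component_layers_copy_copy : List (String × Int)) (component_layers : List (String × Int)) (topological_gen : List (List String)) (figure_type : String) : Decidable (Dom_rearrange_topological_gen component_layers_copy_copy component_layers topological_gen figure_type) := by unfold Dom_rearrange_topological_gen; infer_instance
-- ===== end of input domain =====

-- B plans all moves in one pass over the dict (per-layer 'moved' sets and 'added' lists) and then
-- rebuilds every layer once with a set-based filter, instead of A's in-place per-key list scans and
-- list.remove calls.  A mutates topological_gen in place and returns it; B builds a fresh list —
-- the equivalence proved here is about the RETURN value only.

-- ===== PORT A =====
-- the two statement block 'topological_gen[component_layers[key]].remove(key)' (both branches of A)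
def pvARemove (cl : PySem.Dict String Int) (tg1 : List (List String)) (key : String) :
    Option (List (List String)) :=
  match cl.get? key with
  | none => none
  | some j =>
    match PySem.List.pyGet? tg1 j with
    | none => none
    | some lj =>
      match PySem.List.remove? lj key with
      | none => none
      | some lj' => some (PySem.List.pySetD tg1 j lj')

-- one iteration of A's loop for figure_type == 'all' (none = the iteration raises)
def pvAStepAll (cl : PySem.Dict String Int) (acc : Option (List (List String)))
    (kv : String × Int) : Option (List (List String)) :=
  match acc with
  | none => none
  | some tg =>
    match PySem.List.pyGet? tg kv.2 with
    | none => none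
    | some layer =>
      if kv.1 ∈ layer then some tg
      else pvARemove cl (PySem.List.pySetD tg kv.2 (layer ++ [kv.1])) kv.1

-- one iteration of A's loop for figure_type == 'component_only' (none = the iteration raises;
-- A's 'except: breakpoint()' then raises bdb.BdbQuit when pdb is active, so no value is returned)
def pvAStepComp (cl : PySem.Dict String Int) (acc : Option (List (List String)))
    (kv : String × Int) : Option (List (List String)) :=
  match acc with
  | none => none
  | some tg =>
    if kv.2 > PySem.List.len tg - 1 then
      pvARemove cl (tg ++ [[kv.1]]) kv.1
    else
      match PySem.List.pyGet? tg kv.2 with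
      | none => none
      | some layer =>
        if kv.1 ∈ layer then some tg
        else pvARemove cl (PySem.List.pySetD tg kv.2 (layer ++ [kv.1])) kv.1

def rearrange_topological_gen (component_layers_copy_copy : List (String × Int)) (component_layers : List (String × Int)) (topological_gen : List (List String)) (figure_type : String) : List (List String) :=
  if figure_type = "all" then
    (((PySem.Dict.ofList component_layers_copy_copy).items.foldl
        (pvAStepAll (PySem.Dict.ofList component_layers))
        (some topological_gen)).getD topological_gen)
  else if figure_type = "component_only" then
    (((PySem.Dict.ofList component_layers_copy_copy).items.foldl
        (pvAStepComp (PySem.Dict.ofList component_layers))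
        (some topological_gen)).getD topological_gen)
  else topological_gen

-- ===== PORT B =====
-- B's accumulator: (moved, added, extra)
abbrev PvSt := List (PySem.Set String) × List (List String) × List (List String)

-- one iteration of Source B's planning loop (none = the iteration raises)
def pvBStep (grow : Bool) (len0 : Int) (members : List (PySem.Set String))
    (cl : PySem.Dict String Int) (acc : Option PvSt) (kv : String × Int) : Option PvSt :=
  match acc with
  | none => none
  | some (mov, add, extra) =>
    if grow = true ∧ kv.2 ≥ len0 + (extra.length : Int) then
      match cl.get? kv.1 with
      | none => none
      | some j =>
        match PySem.List.pyGet? mov j with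
        | none => none
        | some s => some (PySem.List.pySetD mov j (PySem.Set.add s kv.1), add, extra ++ [[kv.1]])
    else if ¬ (kv.2 < len0 ∧ kv.1 ∈ PySem.List.pyGetD members kv.2 PySem.Set.empty) then
      match
        (if kv.2 < len0 then
          match PySem.List.pyGet? add kv.2 with
          | none => none
          | some l => some (mov, PySem.List.pySetD add kv.2 (l ++ [kv.1]), extra)
        else
          match PySem.List.pyGet? extra (kv.2 - len0) with
          | none => none
          | some l => some (mov, add, PySem.List.pySetD extra (kv.2 - len0) (l ++ [kv.1]))) with
      | none => none
      | some (mov1, add1, extra1) =>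
        match cl.get? kv.1 with
        | none => none
        | some j =>
          match PySem.List.pyGet? mov1 j with
          | none => none
          | some s => some (PySem.List.pySetD mov1 j (PySem.Set.add s kv.1), add1, extra1)
    else some (mov, add, extra)

-- Source B's final rebuild: [[x for x in tg[p] if x not in moved[p]] + added[p] for p in range(n)] + extra
def pvRender (tg : List (List String)) (mov : List (PySem.Set String))
    (add extra : List (List String)) : List (List String) :=
  ((PySem.List.pyRange 0 (tg.length : Int) 1).map
    (fun p => (PySem.List.pyGetD tg p []).filter
        (fun x => decide (x ∉ PySem.List.pyGetD mov p PySem.Set.empty))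
      ++ PySem.List.pyGetD add p [])) ++ extra

def rearrange_topological_gen_alt (component_layers_copy_copy : List (String × Int)) (component_layers : List (String × Int)) (topological_gen : List (List String)) (figure_type : String) : List (List String) :=
  if figure_type ≠ "all" ∧ figure_type ≠ "component_only" then topological_gen
  else
    match (PySem.Dict.ofList component_layers_copy_copy).items.foldl
        (pvBStep (figure_type = "component_only") (topological_gen.length : Int)
          (topological_gen.map PySem.Set.ofList) (PySem.Dict.ofList component_layers))
        (some (topological_gen.map (fun _ => PySem.Set.empty),
               topological_gen.map (fun _ => []), [])) with
    | none => topological_gen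
    | some (mov, add, extra) => pvRender topological_gen mov add extra

-- ===== PRECONDITION & SPEC =====
-- Pre_ excludes inputs where a loop iteration of A raises (layer index out of range, key missing
-- from component_layers, key absent from its source layer): for figure_type 'all' the exception
-- propagates, for 'component_only' A's bare 'except: breakpoint()' either raises bdb.BdbQuit or
-- (with pdb disabled) silently returns a half-updated list.  It also excludes negative layer
-- indices (Python wraparound), outside the task's natural domain, and two defensible corners on
-- which A returns an accidental value: a moved key occurring more than once in its source layer
-- (A's list.remove drops only the first occurrence) and component_layers pointing at the key's own
-- target layer while the key is absent from it (A appends the key and immediately removes it).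
def Pre_rearrange_topological_gen (component_layers_copy_copy : List (String × Int)) (component_layers : List (String × Int)) (topological_gen : List (List String)) (figure_type : String) : Prop :=
  (figure_type = "all" ∨ figure_type = "component_only") →
  ∀ kv ∈ (PySem.Dict.ofList component_layers_copy_copy).items,
    0 ≤ kv.2 ∧
    (figure_type = "all" → kv.2 < (topological_gen.length : Int)) ∧
    (¬ (kv.2 < (topological_gen.length : Int) ∧ kv.1 ∈ PySem.List.pyGetD topological_gen kv.2 []) →
      ((PySem.Dict.ofList component_layers).get? kv.1).isSome = true ∧
      0 ≤ ((PySem.Dict.ofList component_layers).get? kv.1).getD 0 ∧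
      ((PySem.Dict.ofList component_layers).get? kv.1).getD 0 < (topological_gen.length : Int) ∧
      (PySem.List.pyGetD topological_gen (((PySem.Dict.ofList component_layers).get? kv.1).getD 0) []).count kv.1 = 1)
instance (component_layers_copy_copy : List (String × Int)) (component_layers : List (String × Int)) (topological_gen : List (List String)) (figure_type : String) : Decidable (Pre_rearrange_topological_gen component_layers_copy_copy component_layers topological_gen figure_type) := by unfold Pre_rearrange_topological_gen; infer_instance

def pvWitness_rearrange_topological_gen : (List (String × Int)) × (List (String × Int)) × List (List String) × String :=
  ([("a", 1), ("b", 0)], [("a", 0), ("b", 1)], [["a", "b"], ["c"]], "all")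

def Spec_rearrange_topological_gen (component_layers_copy_copy : List (String × Int)) (component_layers : List (String × Int)) (topological_gen : List (List String)) (figure_type : String) (out : List (List String)) : Prop := out = rearrange_topological_gen_alt component_layers_copy_copy component_layers topological_gen figure_type
instance (component_layers_copy_copy : List (String × Int)) (component_layers : List (String × Int)) (topological_gen : List (List String)) (figure_type : String) (out : List (List String)) : Decidable (Spec_rearrange_topological_gen component_layers_copy_copy component_layers topological_gen figure_type out) := by unfold Spec_rearrange_topological_gen; infer_instance

-- ===== CLAIM (what is proved, stated in full; the proofs are below) =====
def Claim_equal_rearrange_topological_gen : Prop := ∀ (component_layers_copy_copy : List (String × Int)) (component_layers : List (String × Int)) (topological_gen : List (List String)) (figure_type : String), Dom_rearrange_topological_gen component_layers_copy_copy component_layers topological_gen figure_type → Pre_rearrange_topological_gen component_layers_copy_copy component_layers topological_gen figure_type → Spec_rearrange_topological_gen component_layers_copy_copy component_layers topological_gen figure_type (rearrange_topological_gen component_layers_copy_copy component_layers topological_gen figure_type)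

-- ===== LEMMAS AND PROOFS =====
theorem not_mem_set_empty (k : String) : k ∉ (PySem.Set.empty : PySem.Set String) := by
  rw [show (PySem.Set.empty : PySem.Set String) = [] from rfl]
  exact List.not_mem_nil

theorem filter_empty_dead (l : List String) :
    l.filter (fun x => decide (x ∉ (PySem.Set.empty : PySem.Set String))) = l := by
  apply List.filter_eq_self.mpr
  intro x _
  exact decide_eq_true (not_mem_set_empty x)

theorem mem_filter_not_dead (l : List String) (dead : PySem.Set String) (k : String)
    (hd : k ∉ dead) :
    k ∈ l.filter (fun x => decide (x ∉ dead)) ↔ k ∈ l := by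
  simp [List.mem_filter, hd]

theorem remove?_filter (l : List String) (dead : PySem.Set String) (k : String)
    (hc : l.count k = 1) (hd : k ∉ dead) :
    PySem.List.remove? (l.filter (fun x => decide (x ∉ dead))) k
      = some (l.filter (fun x => decide (x ∉ PySem.Set.add dead k))) := by
  induction l with
  | nil => simp at hc
  | cons x l ih =>
    by_cases hx : x = k
    · subst hx
      have hl : l.count x = 0 := by
        have h2 := hc
        rw [List.count_cons, if_pos (by simp)] at h2
        omega
      have hnotmem : x ∉ l := List.count_eq_zero.mp hl
      rw [List.filter_cons, if_pos (by simpa using hd), PySem.List.remove?_cons_self,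
        List.filter_cons, if_neg (by simp [PySem.Set.mem_add])]
      congr 1
      apply List.filter_congr
      intro y hy
      have hyx : y ≠ x := fun e => hnotmem (e ▸ hy)
      simp [PySem.Set.mem_add, hyx]
    · have hc' : l.count k = 1 := by
        have h2 := hc
        rw [List.count_cons, if_neg (by simp; exact hx)] at h2
        simpa using h2
      by_cases hxd : x ∈ dead
      · rw [List.filter_cons, if_neg (by simpa using hxd), List.filter_cons,
          if_neg (by simp [PySem.Set.mem_add, hxd])]
        exact ih hc'
      · rw [List.filter_cons, if_pos (by simpa using hxd), List.filter_cons,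
          if_pos (by simp [PySem.Set.mem_add, hxd, hx]), PySem.List.remove?_cons_of_ne _ hx, ih hc']
        rfl

theorem remove?_append_left (l1 l2 : List String) (k : String) (h : k ∈ l1) :
    PySem.List.remove? (l1 ++ l2) k = (PySem.List.remove? l1 k).map (· ++ l2) := by
  induction l1 with
  | nil => cases h
  | cons x l ih =>
    by_cases hx : x = k
    · subst hx; simp
    · have h' : k ∈ l := by
        rcases List.mem_cons.mp h with h | h
        · exact absurd h.symm hx
        · exact h
      rw [List.cons_append, PySem.List.remove?_cons_of_ne _ hx,
        PySem.List.remove?_cons_of_ne _ hx, ih h']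
      cases PySem.List.remove? l k <;> simp

-- normal form of the rendered result
def pvBody (tg : List (List String)) (mov : List (PySem.Set String))
    (add : List (List String)) (p : Nat) : List String :=
  (tg.getD p []).filter (fun x => decide (x ∉ mov.getD p PySem.Set.empty)) ++ add.getD p []

def pvR (tg : List (List String)) (mov : List (PySem.Set String))
    (add extra : List (List String)) : List (List String) :=
  (List.range tg.length).map (pvBody tg mov add) ++ extra

theorem pvRender_eq (tg : List (List String)) (mov : List (PySem.Set String))
    (add extra : List (List String)) : pvRender tg mov add extra = pvR tg mov add extra := by
  unfold pvRender pvR pvBody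
  rw [PySem.List.pyRange_zero_nat]
  simp [List.map_map, Function.comp_def]

theorem pvR_length (tg : List (List String)) (mov : List (PySem.Set String))
    (add extra : List (List String)) :
    (pvR tg mov add extra).length = tg.length + extra.length := by
  simp [pvR]

theorem pvR_get_left (tg : List (List String)) (mov : List (PySem.Set String))
    (add extra : List (List String)) (n : Nat) (h : n < tg.length) :
    PySem.List.pyGet? (pvR tg mov add extra) (n : Int) = some (pvBody tg mov add n) := by
  rw [PySem.List.pyGet?_natCast]
  unfold pvR
  rw [List.getElem?_append_left (by simpa using h)]
  simp [h]

theorem pvR_get_right (tg : List (List String)) (mov : List (PySem.Set String))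
    (add extra : List (List String)) (n : Nat) (h : tg.length ≤ n) :
    PySem.List.pyGet? (pvR tg mov add extra) (n : Int) = extra[n - tg.length]? := by
  rw [PySem.List.pyGet?_natCast]
  unfold pvR
  rw [List.getElem?_append_right (by simpa using h)]
  simp

theorem map_range_set {α : Type} (N n : Nat) (f : Nat → α) (v : α) (_h : n < N) :
    ((List.range N).map f).set n v = (List.range N).map (fun p => if p = n then v else f p) := by
  apply List.ext_getElem
  · simp
  · intro i h1 h2
    simp only [List.getElem_set, List.getElem_map, List.getElem_range] at *
    by_cases hi : i = n
    · simp [hi]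
    · simp only [if_neg hi, if_neg (fun e : n = i => hi e.symm)]

theorem getD_set {α : Type} (l : List α) (n p : Nat) (x d : α) (h : n < l.length) :
    (l.set n x).getD p d = if p = n then x else l.getD p d := by
  by_cases hp : p = n
  · subst hp; simp [List.getD_eq_getElem?_getD, h]
  · simp only [List.getD_eq_getElem?_getD, List.getElem?_set,
      if_neg (fun e : n = p => hp e.symm), if_neg hp]

-- rendering after B records an append to an existing layer
theorem pvBody_updAdd (tg : List (List String)) (mov : List (PySem.Set String))
    (add : List (List String)) (n : Nat) (k : String) (hlen : add.length = tg.length)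
    (h : n < tg.length) (p : Nat) :
    pvBody tg mov (add.set n (add.getD n [] ++ [k])) p =
      if p = n then pvBody tg mov add n ++ [k] else pvBody tg mov add p := by
  unfold pvBody
  rw [getD_set _ _ _ _ _ (by omega)]
  by_cases hp : p = n <;> simp [hp]

-- rendering after B records a move out of a layer
theorem pvBody_updMov (tg : List (List String)) (mov : List (PySem.Set String))
    (add : List (List String)) (j : Nat) (s : PySem.Set String) (hlen : mov.length = tg.length)
    (h : j < tg.length) (p : Nat) :
    pvBody tg (mov.set j s) add p =
      if p = j then (tg.getD j []).filter (fun x => decide (x ∉ s)) ++ add.getD j []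
      else pvBody tg mov add p := by
  unfold pvBody
  rw [getD_set _ _ _ _ _ (by omega)]
  by_cases hp : p = j <;> simp [hp]

-- the initial accumulator renders to tg itself
theorem pvR_init (tg : List (List String)) :
    pvR tg (tg.map (fun _ => PySem.Set.empty)) (tg.map (fun _ => [])) [] = tg := by
  unfold pvR
  rw [List.append_nil]
  apply List.ext_getElem
  · simp
  · intro i h1 h2
    simp only [List.getElem_map, List.getElem_range]
    unfold pvBody
    have h1' : i < tg.length := by simpa using h1
    have e1 : (tg.map (fun _ => (PySem.Set.empty : PySem.Set String))).getD i PySem.Set.empty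
        = PySem.Set.empty := by
      simp [List.getD_eq_getElem?_getD, h1']
    have e2 : (tg.map (fun _ => ([] : List String))).getD i [] = [] := by
      simp [List.getD_eq_getElem?_getD, h1']
    rw [e1, e2, filter_empty_dead]
    simp [List.getD_eq_getElem?_getD, h1']

theorem getD_mem_or {α : Type} (l : List α) (n : Nat) (d : α) :
    l.getD n d ∈ l ∨ l.getD n d = d := by
  by_cases h : n < l.length
  · left
    rw [List.getD_eq_getElem?_getD, List.getElem?_eq_getElem h]
    exact List.getElem_mem h
  · right
    rw [List.getD_eq_getElem?_getD, List.getElem?_eq_none (by omega)]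
    rfl

theorem mem_pvBody (tg : List (List String)) (mov : List (PySem.Set String))
    (add : List (List String)) (k : String) (n : Nat)
    (hr : ∀ s ∈ mov, k ∉ s) (ha : ∀ l ∈ add, k ∉ l) :
    k ∈ pvBody tg mov add n ↔ k ∈ tg.getD n [] := by
  have hrem : k ∉ mov.getD n PySem.Set.empty := by
    rcases getD_mem_or mov n PySem.Set.empty with h | h
    · exact hr _ h
    · rw [h]; exact not_mem_set_empty k
  have happ : k ∉ add.getD n [] := by
    rcases getD_mem_or add n [] with h | h
    · exact ha _ h
    · rw [h]; exact List.not_mem_nil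
  unfold pvBody
  simp only [List.mem_append, mem_filter_not_dead _ _ _ hrem, happ, or_false]

theorem pvR_set_left (tg : List (List String)) (mov : List (PySem.Set String))
    (add extra : List (List String)) (n : Nat) (v : List String) (h : n < tg.length) :
    PySem.List.pySetD (pvR tg mov add extra) (n : Int) v =
      ((List.range tg.length).map (fun p => if p = n then v else pvBody tg mov add p)) ++ extra := by
  rw [PySem.List.pySetD_natCast]
  unfold pvR
  rw [List.set_append, if_pos (by simpa using h), map_range_set _ _ _ _ h]

theorem pvR_set_right (tg : List (List String)) (mov : List (PySem.Set String))
    (add extra : List (List String)) (n : Nat) (v : List String) (h : tg.length ≤ n) :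
    PySem.List.pySetD (pvR tg mov add extra) (n : Int) v =
      pvR tg mov add (extra.set (n - tg.length) v) := by
  rw [PySem.List.pySetD_natCast]
  unfold pvR
  rw [List.set_append, if_neg (by simp; omega)]
  simp

theorem pvR_updAdd (tg : List (List String)) (mov : List (PySem.Set String))
    (add extra : List (List String)) (n : Nat) (k : String)
    (h : n < tg.length) (hlen : add.length = tg.length) :
    ((List.range tg.length).map
        (fun p => if p = n then pvBody tg mov add n ++ [k] else pvBody tg mov add p)) ++ extra =
      pvR tg mov (add.set n (add.getD n [] ++ [k])) extra := by
  unfold pvR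
  congr 1
  apply List.map_congr_left
  intro p _
  rw [pvBody_updAdd tg mov add n k hlen h p]

-- A's removal statement, acting on a rendered state, equals B recording the move
theorem pvARemove_render (cl : PySem.Dict String Int) (tg : List (List String))
    (mov : List (PySem.Set String)) (add extra : List (List String)) (k : String) (j : Int)
    (hcl : cl.get? k = some j) (hj0 : 0 ≤ j) (hjlt : j < (tg.length : Int))
    (hrlen : mov.length = tg.length)
    (hc : (tg.getD j.toNat []).count k = 1)
    (hrj : k ∉ mov.getD j.toNat PySem.Set.empty) :
    pvARemove cl (pvR tg mov add extra) k =
      some (pvR tg (mov.set j.toNat (PySem.Set.add (mov.getD j.toNat PySem.Set.empty) k)) add extra) := by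
  have hn : j.toNat < tg.length := by omega
  have hj : j = ((j.toNat : Nat) : Int) := (Int.toNat_of_nonneg hj0).symm
  have hk : k ∈ tg.getD j.toNat [] := by
    have : 0 < (tg.getD j.toNat []).count k := by omega
    exact List.count_pos_iff.mp this
  have hget : PySem.List.pyGet? (pvR tg mov add extra) j = some (pvBody tg mov add j.toNat) := by
    have h2 := pvR_get_left tg mov add extra j.toNat hn
    rwa [← hj] at h2
  have hrm : PySem.List.remove? (pvBody tg mov add j.toNat) k =
      some ((tg.getD j.toNat []).filter
          (fun x => decide (x ∉ PySem.Set.add (mov.getD j.toNat PySem.Set.empty) k))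
        ++ add.getD j.toNat []) := by
    unfold pvBody
    rw [remove?_append_left _ _ _ ((mem_filter_not_dead _ _ _ hrj).mpr hk),
      remove?_filter _ _ _ hc hrj]
    rfl
  have hset : PySem.List.pySetD (pvR tg mov add extra) j
      ((tg.getD j.toNat []).filter
          (fun x => decide (x ∉ PySem.Set.add (mov.getD j.toNat PySem.Set.empty) k))
        ++ add.getD j.toNat []) =
      pvR tg (mov.set j.toNat (PySem.Set.add (mov.getD j.toNat PySem.Set.empty) k)) add extra := by
    have h3 := pvR_set_left tg mov add extra j.toNat
      ((tg.getD j.toNat []).filter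
          (fun x => decide (x ∉ PySem.Set.add (mov.getD j.toNat PySem.Set.empty) k))
        ++ add.getD j.toNat []) hn
    rw [← hj] at h3
    rw [h3]
    unfold pvR
    congr 1
    apply List.map_congr_left
    intro p _
    rw [pvBody_updMov tg mov add j.toNat _ hrlen hn p]
  unfold pvARemove
  simp only [hcl, hget, hrm, hset]

-- definitional reductions of the step functions on a live accumulator
theorem pvAStepAll_some (cl : PySem.Dict String Int) (tg : List (List String))
    (k : String) (i : Int) :
    pvAStepAll cl (some tg) (k, i) =
      (match PySem.List.pyGet? tg i with
      | none => none
      | some layer =>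
        if k ∈ layer then some tg
        else pvARemove cl (PySem.List.pySetD tg i (layer ++ [k])) k) := rfl

theorem pvAStepComp_some (cl : PySem.Dict String Int) (tg : List (List String))
    (k : String) (i : Int) :
    pvAStepComp cl (some tg) (k, i) =
      (if i > PySem.List.len tg - 1 then
        pvARemove cl (tg ++ [[k]]) k
      else
        match PySem.List.pyGet? tg i with
        | none => none
        | some layer =>
          if k ∈ layer then some tg
          else pvARemove cl (PySem.List.pySetD tg i (layer ++ [k])) k) := rfl

theorem pvBStep_some (grow : Bool) (len0 : Int) (members : List (PySem.Set String))
    (cl : PySem.Dict String Int) (mov : List (PySem.Set String))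
    (add extra : List (List String)) (k : String) (i : Int) :
    pvBStep grow len0 members cl (some (mov, add, extra)) (k, i) =
      (if grow = true ∧ i ≥ len0 + (extra.length : Int) then
        match cl.get? k with
        | none => none
        | some j =>
          match PySem.List.pyGet? mov j with
          | none => none
          | some s => some (PySem.List.pySetD mov j (PySem.Set.add s k), add, extra ++ [[k]])
      else if ¬ (i < len0 ∧ k ∈ PySem.List.pyGetD members i PySem.Set.empty) then
        match
          (if i < len0 then
            match PySem.List.pyGet? add i with
            | none => none
            | some l => some (mov, PySem.List.pySetD add i (l ++ [k]), extra)
          else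
            match PySem.List.pyGet? extra (i - len0) with
            | none => none
            | some l => some (mov, add, PySem.List.pySetD extra (i - len0) (l ++ [k]))) with
        | none => none
        | some (mov1, add1, extra1) =>
          match cl.get? k with
          | none => none
          | some j =>
            match PySem.List.pyGet? mov1 j with
            | none => none
            | some s => some (PySem.List.pySetD mov1 j (PySem.Set.add s k), add1, extra1)
      else some (mov, add, extra)) := rfl

def pvFresh (k : String) (mov : List (PySem.Set String)) (add extra : List (List String)) : Prop :=
  (∀ s ∈ mov, k ∉ s) ∧ (∀ l ∈ add, k ∉ l) ∧ (∀ l ∈ extra, k ∉ l)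

theorem mem_members (tg : List (List String)) (k : String) (n : Nat) (hn : n < tg.length) :
    (k ∈ PySem.List.pyGetD (tg.map PySem.Set.ofList) (n : Int) PySem.Set.empty) ↔
      k ∈ tg.getD n [] := by
  rw [PySem.List.pyGetD_natCast]
  simp [List.getD_eq_getElem?_getD, List.getElem?_eq_getElem hn, PySem.Set.mem_ofList,
    List.getElem?_map]

theorem pvStepAll_sim (cl : PySem.Dict String Int) (tg : List (List String))
    (mov : List (PySem.Set String)) (add extra : List (List String)) (k : String) (i : Int)
    (hrlen : mov.length = tg.length) (halen : add.length = tg.length)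
    (h0 : 0 ≤ i) (hilt : i < (tg.length : Int))
    (hsrc : ¬ (i < (tg.length : Int) ∧ k ∈ PySem.List.pyGetD tg i []) →
      ((cl.get? k).isSome = true ∧ 0 ≤ (cl.get? k).getD 0 ∧
        (cl.get? k).getD 0 < (tg.length : Int) ∧
        (PySem.List.pyGetD tg ((cl.get? k).getD 0) []).count k = 1))
    (hfr : pvFresh k mov add extra) :
    ∃ mov' add' extra',
      pvBStep false (tg.length : Int) (tg.map PySem.Set.ofList) cl
        (some (mov, add, extra)) (k, i) = some (mov', add', extra') ∧
      pvAStepAll cl (some (pvR tg mov add extra)) (k, i) = some (pvR tg mov' add' extra') ∧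
      mov'.length = tg.length ∧ add'.length = tg.length ∧
      (∀ k', k' ≠ k → pvFresh k' mov add extra → pvFresh k' mov' add' extra') := by
  obtain ⟨hr, ha, hnw⟩ := hfr
  obtain ⟨n, rfl⟩ : ∃ n : Nat, i = (n : Int) := ⟨i.toNat, (Int.toNat_of_nonneg h0).symm⟩
  have hn : n < tg.length := by exact_mod_cast hilt
  have hgetA : PySem.List.pyGet? (pvR tg mov add extra) (n : Int) =
      some (pvBody tg mov add n) := pvR_get_left tg mov add extra n hn
  by_cases hmem : k ∈ tg.getD n []
  · -- key already in its target layer: both sides are a no-op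
    refine ⟨mov, add, extra, ?_, ?_, hrlen, halen, fun _ _ h => h⟩
    · rw [pvBStep_some, if_neg (by simp),
        if_neg (not_not_intro ⟨hilt, (mem_members tg k n hn).mpr hmem⟩)]
    · rw [pvAStepAll_some]
      simp only [hgetA]
      rw [if_pos ((mem_pvBody tg mov add k n hr ha).mpr hmem)]
  · -- key must move
    have hnot : ¬ ((n : Int) < (tg.length : Int) ∧ k ∈ PySem.List.pyGetD tg (n : Int) []) := by
      rw [PySem.List.pyGetD_natCast]
      exact fun h => hmem h.2
    obtain ⟨hcs, hj0, hjlt, hjc⟩ := hsrc hnot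
    obtain ⟨j, hclj⟩ : ∃ j, cl.get? k = some j := by
      cases h : cl.get? k with
      | none => rw [h] at hcs; cases hcs
      | some j => exact ⟨j, rfl⟩
    rw [hclj] at hj0 hjlt hjc
    simp only [Option.getD_some] at hj0 hjlt hjc
    obtain ⟨m, rfl⟩ : ∃ m : Nat, j = (m : Int) := ⟨j.toNat, (Int.toNat_of_nonneg hj0).symm⟩
    have hm : m < tg.length := by exact_mod_cast hjlt
    have hc : (tg.getD m []).count k = 1 := by
      rwa [PySem.List.pyGetD_natCast] at hjc
    have hkj : k ∈ tg.getD m [] := List.count_pos_iff.mp (by omega)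
    have hji : (m : Int) ≠ (n : Int) := by
      intro e
      have : m = n := by exact_mod_cast e
      exact hmem (this ▸ hkj)
    have hbodyk : k ∉ pvBody tg mov add n :=
      fun h => hmem ((mem_pvBody tg mov add k n hr ha).mp h)
    have hcond : ¬ ((n : Int) < (tg.length : Int) ∧
        k ∈ PySem.List.pyGetD (tg.map PySem.Set.ofList) (n : Int) PySem.Set.empty) := by
      intro h
      exact hmem ((mem_members tg k n hn).mp h.2)
    have hsetA : PySem.List.pySetD (pvR tg mov add extra) (n : Int)
        (pvBody tg mov add n ++ [k]) =
        ((List.range tg.length).map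
          (fun p => if p = n then pvBody tg mov add n ++ [k]
            else pvBody tg mov add p)) ++ extra :=
      pvR_set_left tg mov add extra n (pvBody tg mov add n ++ [k]) hn
    have hrj : k ∉ mov.getD m PySem.Set.empty := by
      rcases getD_mem_or mov m PySem.Set.empty with h | h
      · exact hr _ h
      · rw [h]; exact not_mem_set_empty k
    refine ⟨mov.set m (PySem.Set.add (mov.getD m PySem.Set.empty) k),
      add.set n (add.getD n [] ++ [k]), extra, ?_, ?_, by simp [hrlen], by simp [halen], ?_⟩
    · rw [pvBStep_some, if_neg (by simp), if_pos hcond]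
      rw [if_pos hilt]
      have hga : PySem.List.pyGet? add ((n : Nat) : Int) = some (add.getD n []) := by
        rw [PySem.List.pyGet?_natCast,
          List.getElem?_eq_getElem (show n < add.length by omega),
          List.getD_eq_getElem?_getD,
          List.getElem?_eq_getElem (show n < add.length by omega)]
        rfl
      have hgr : PySem.List.pyGet? mov ((m : Nat) : Int) = some (mov.getD m PySem.Set.empty) := by
        rw [PySem.List.pyGet?_natCast,
          List.getElem?_eq_getElem (show m < mov.length by omega),
          List.getD_eq_getElem?_getD,
          List.getElem?_eq_getElem (show m < mov.length by omega)]
        rfl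
      simp only [hga, hclj, hgr, PySem.List.pySetD_natCast]
    · rw [pvAStepAll_some]
      simp only [hgetA]
      rw [if_neg hbodyk, hsetA, pvR_updAdd tg mov add extra n k hn halen]
      have h4 := pvARemove_render cl tg mov (add.set n (add.getD n [] ++ [k])) extra k
        ((m : Nat) : Int) hclj (by exact_mod_cast Nat.zero_le m) hjlt hrlen
      rw [show ((m : Nat) : Int).toNat = m by simp] at h4
      exact h4 hc hrj
    · rintro k' hk' ⟨fr, fa, fn⟩
      refine ⟨?_, ?_, fn⟩
      · intro s hs
        rcases List.mem_or_eq_of_mem_set hs with h | h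
        · exact fr _ h
        · subst h
          simp only [PySem.Set.mem_add]
          rintro (h | rfl)
          · exact fr _ (getD_mem_or mov m PySem.Set.empty |>.resolve_right
              (fun he => by rw [he] at h; exact not_mem_set_empty k' h)) h
          · exact hk' rfl
      · intro l hl
        rcases List.mem_or_eq_of_mem_set hl with h | h
        · exact fa _ h
        · subst h
          simp only [List.mem_append, List.mem_singleton]
          rintro (h | rfl)
          · exact fa _ (getD_mem_or add n [] |>.resolve_right
              (fun he => by rw [he] at h; cases h)) h
          · exact hk' rfl

theorem pvStepComp_sim (cl : PySem.Dict String Int) (tg : List (List String))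
    (mov : List (PySem.Set String)) (add extra : List (List String)) (k : String) (i : Int)
    (hrlen : mov.length = tg.length) (halen : add.length = tg.length)
    (h0 : 0 ≤ i)
    (hsrc : ¬ (i < (tg.length : Int) ∧ k ∈ PySem.List.pyGetD tg i []) →
      ((cl.get? k).isSome = true ∧ 0 ≤ (cl.get? k).getD 0 ∧
        (cl.get? k).getD 0 < (tg.length : Int) ∧
        (PySem.List.pyGetD tg ((cl.get? k).getD 0) []).count k = 1))
    (hfr : pvFresh k mov add extra) :
    ∃ mov' add' extra',
      pvBStep true (tg.length : Int) (tg.map PySem.Set.ofList) cl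
        (some (mov, add, extra)) (k, i) = some (mov', add', extra') ∧
      pvAStepComp cl (some (pvR tg mov add extra)) (k, i) = some (pvR tg mov' add' extra') ∧
      mov'.length = tg.length ∧ add'.length = tg.length ∧
      (∀ k', k' ≠ k → pvFresh k' mov add extra → pvFresh k' mov' add' extra') := by
  obtain ⟨hr, ha, hnw⟩ := hfr
  obtain ⟨n, rfl⟩ : ∃ n : Nat, i = (n : Int) := ⟨i.toNat, (Int.toNat_of_nonneg h0).symm⟩
  have hlenR : PySem.List.len (pvR tg mov add extra) = (tg.length : Int) + (extra.length : Int) := by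
    rw [PySem.List.len_eq, pvR_length]
    push_cast
    ring
  by_cases hbig : ((n : Nat) : Int) ≥ (tg.length : Int) + (extra.length : Int)
  · -- a fresh layer is appended at the end
    have hnot : ¬ (((n : Nat) : Int) < (tg.length : Int) ∧
        k ∈ PySem.List.pyGetD tg ((n : Nat) : Int) []) := fun h => absurd h.1 (by omega)
    obtain ⟨hcs, hj0, hjlt, hjc⟩ := hsrc hnot
    obtain ⟨j, hclj⟩ : ∃ j, cl.get? k = some j := by
      cases h : cl.get? k with
      | none => rw [h] at hcs; cases hcs
      | some j => exact ⟨j, rfl⟩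
    rw [hclj] at hj0 hjlt hjc
    simp only [Option.getD_some] at hj0 hjlt hjc
    obtain ⟨m, rfl⟩ : ∃ m : Nat, j = (m : Int) := ⟨j.toNat, (Int.toNat_of_nonneg hj0).symm⟩
    have hm : m < tg.length := by exact_mod_cast hjlt
    have hc : (tg.getD m []).count k = 1 := by
      rwa [PySem.List.pyGetD_natCast] at hjc
    have hrj : k ∉ mov.getD m PySem.Set.empty := by
      rcases getD_mem_or mov m PySem.Set.empty with h | h
      · exact hr _ h
      · rw [h]; exact not_mem_set_empty k
    refine ⟨mov.set m (PySem.Set.add (mov.getD m PySem.Set.empty) k), add, extra ++ [[k]],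
      ?_, ?_, by simp [hrlen], halen, ?_⟩
    · rw [pvBStep_some, if_pos ⟨rfl, hbig⟩]
      have hgr : PySem.List.pyGet? mov ((m : Nat) : Int) = some (mov.getD m PySem.Set.empty) := by
        rw [PySem.List.pyGet?_natCast,
          List.getElem?_eq_getElem (show m < mov.length by omega),
          List.getD_eq_getElem?_getD,
          List.getElem?_eq_getElem (show m < mov.length by omega)]
        rfl
      simp only [hclj, hgr, PySem.List.pySetD_natCast]
    · rw [pvAStepComp_some, if_pos (by rw [hlenR]; omega)]
      have happend : pvR tg mov add extra ++ [[k]] = pvR tg mov add (extra ++ [[k]]) := by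
        unfold pvR
        rw [List.append_assoc]
      rw [happend]
      have h4 := pvARemove_render cl tg mov add (extra ++ [[k]]) k ((m : Nat) : Int) hclj
        (by exact_mod_cast Nat.zero_le m) hjlt hrlen
      rw [show ((m : Nat) : Int).toNat = m by simp] at h4
      exact h4 hc hrj
    · rintro k' hk' ⟨fr, fa, fn⟩
      refine ⟨?_, fa, ?_⟩
      · intro s hs
        rcases List.mem_or_eq_of_mem_set hs with h | h
        · exact fr _ h
        · subst h
          simp only [PySem.Set.mem_add]
          rintro (h | rfl)
          · exact fr _ (getD_mem_or mov m PySem.Set.empty |>.resolve_right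
              (fun he => by rw [he] at h; exact not_mem_set_empty k' h)) h
          · exact hk' rfl
      · intro l hl
        rcases List.mem_append.mp hl with h | h
        · exact fn _ h
        · rw [List.mem_singleton.mp h]
          simp only [List.mem_singleton]
          exact fun e => hk' e
  · -- the key goes into an existing (possibly freshly appended) layer
    have hsmall : n < tg.length + extra.length := by omega
    by_cases hn : n < tg.length
    · -- existing original layer: same situation as in the 'all' loop
      have hgetA : PySem.List.pyGet? (pvR tg mov add extra) (n : Int) =
          some (pvBody tg mov add n) := pvR_get_left tg mov add extra n hn
      have hilt : ((n : Nat) : Int) < (tg.length : Int) := by exact_mod_cast hn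
      by_cases hmem : k ∈ tg.getD n []
      · refine ⟨mov, add, extra, ?_, ?_, hrlen, halen, fun _ _ h => h⟩
        · rw [pvBStep_some, if_neg (by rw [not_and]; intro _; omega),
            if_neg (not_not_intro ⟨hilt, (mem_members tg k n hn).mpr hmem⟩)]
        · rw [pvAStepComp_some, if_neg (by rw [hlenR]; omega)]
          simp only [hgetA]
          rw [if_pos ((mem_pvBody tg mov add k n hr ha).mpr hmem)]
      · have hnot : ¬ ((n : Int) < (tg.length : Int) ∧
            k ∈ PySem.List.pyGetD tg (n : Int) []) := by
          rw [PySem.List.pyGetD_natCast]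
          exact fun h => hmem h.2
        obtain ⟨hcs, hj0, hjlt, hjc⟩ := hsrc hnot
        obtain ⟨j, hclj⟩ : ∃ j, cl.get? k = some j := by
          cases h : cl.get? k with
          | none => rw [h] at hcs; cases hcs
          | some j => exact ⟨j, rfl⟩
        rw [hclj] at hj0 hjlt hjc
        simp only [Option.getD_some] at hj0 hjlt hjc
        obtain ⟨m, rfl⟩ : ∃ m : Nat, j = (m : Int) := ⟨j.toNat, (Int.toNat_of_nonneg hj0).symm⟩
        have hm : m < tg.length := by exact_mod_cast hjlt
        have hc : (tg.getD m []).count k = 1 := by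
          rwa [PySem.List.pyGetD_natCast] at hjc
        have hkj : k ∈ tg.getD m [] := List.count_pos_iff.mp (by omega)
        have hji : (m : Int) ≠ (n : Int) := by
          intro e
          have : m = n := by exact_mod_cast e
          exact hmem (this ▸ hkj)
        have hbodyk : k ∉ pvBody tg mov add n :=
          fun h => hmem ((mem_pvBody tg mov add k n hr ha).mp h)
        have hcond : ¬ ((n : Int) < (tg.length : Int) ∧
            k ∈ PySem.List.pyGetD (tg.map PySem.Set.ofList) (n : Int) PySem.Set.empty) := by
          intro h
          exact hmem ((mem_members tg k n hn).mp h.2)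
        have hsetA : PySem.List.pySetD (pvR tg mov add extra) (n : Int)
            (pvBody tg mov add n ++ [k]) =
            ((List.range tg.length).map
              (fun p => if p = n then pvBody tg mov add n ++ [k]
                else pvBody tg mov add p)) ++ extra :=
          pvR_set_left tg mov add extra n (pvBody tg mov add n ++ [k]) hn
        have hrj : k ∉ mov.getD m PySem.Set.empty := by
          rcases getD_mem_or mov m PySem.Set.empty with h | h
          · exact hr _ h
          · rw [h]; exact not_mem_set_empty k
        refine ⟨mov.set m (PySem.Set.add (mov.getD m PySem.Set.empty) k),
          add.set n (add.getD n [] ++ [k]), extra, ?_, ?_, by simp [hrlen], by simp [halen], ?_⟩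
        · rw [pvBStep_some, if_neg (by rw [not_and]; intro _; omega), if_pos hcond]
          rw [if_pos hilt]
          have hga : PySem.List.pyGet? add ((n : Nat) : Int) = some (add.getD n []) := by
            rw [PySem.List.pyGet?_natCast,
              List.getElem?_eq_getElem (show n < add.length by omega),
              List.getD_eq_getElem?_getD,
              List.getElem?_eq_getElem (show n < add.length by omega)]
            rfl
          have hgr : PySem.List.pyGet? mov ((m : Nat) : Int) =
              some (mov.getD m PySem.Set.empty) := by
            rw [PySem.List.pyGet?_natCast,
              List.getElem?_eq_getElem (show m < mov.length by omega),
              List.getD_eq_getElem?_getD,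
              List.getElem?_eq_getElem (show m < mov.length by omega)]
            rfl
          simp only [hga, hclj, hgr, PySem.List.pySetD_natCast]
        · rw [pvAStepComp_some, if_neg (by rw [hlenR]; omega)]
          simp only [hgetA]
          rw [if_neg hbodyk, hsetA, pvR_updAdd tg mov add extra n k hn halen]
          have h4 := pvARemove_render cl tg mov (add.set n (add.getD n [] ++ [k])) extra k
            ((m : Nat) : Int) hclj (by exact_mod_cast Nat.zero_le m) hjlt hrlen
          rw [show ((m : Nat) : Int).toNat = m by simp] at h4
          exact h4 hc hrj
        · rintro k' hk' ⟨fr, fa, fn⟩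
          refine ⟨?_, ?_, fn⟩
          · intro s hs
            rcases List.mem_or_eq_of_mem_set hs with h | h
            · exact fr _ h
            · subst h
              simp only [PySem.Set.mem_add]
              rintro (h | rfl)
              · exact fr _ (getD_mem_or mov m PySem.Set.empty |>.resolve_right
                  (fun he => by rw [he] at h; exact not_mem_set_empty k' h)) h
              · exact hk' rfl
          · intro l hl
            rcases List.mem_or_eq_of_mem_set hl with h | h
            · exact fa _ h
            · subst h
              simp only [List.mem_append, List.mem_singleton]
              rintro (h | rfl)
              · exact fa _ (getD_mem_or add n [] |>.resolve_right
                  (fun he => by rw [he] at h; cases h)) h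
              · exact hk' rfl
    · -- the key goes into one of the freshly appended layers
      have hmm : n - tg.length < extra.length := by omega
      have hnot : ¬ (((n : Nat) : Int) < (tg.length : Int) ∧
          k ∈ PySem.List.pyGetD tg ((n : Nat) : Int) []) :=
        fun h => absurd h.1 (by exact_mod_cast fun hh => hn (by exact_mod_cast hh))
      obtain ⟨hcs, hj0, hjlt, hjc⟩ := hsrc hnot
      obtain ⟨j, hclj⟩ : ∃ j, cl.get? k = some j := by
        cases h : cl.get? k with
        | none => rw [h] at hcs; cases hcs
        | some j => exact ⟨j, rfl⟩
      rw [hclj] at hj0 hjlt hjc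
      simp only [Option.getD_some] at hj0 hjlt hjc
      obtain ⟨m, rfl⟩ : ∃ m : Nat, j = (m : Int) := ⟨j.toNat, (Int.toNat_of_nonneg hj0).symm⟩
      have hm : m < tg.length := by exact_mod_cast hjlt
      have hc : (tg.getD m []).count k = 1 := by
        rwa [PySem.List.pyGetD_natCast] at hjc
      have hrj : k ∉ mov.getD m PySem.Set.empty := by
        rcases getD_mem_or mov m PySem.Set.empty with h | h
        · exact hr _ h
        · rw [h]; exact not_mem_set_empty k
      have hcond : ¬ (((n : Nat) : Int) < (tg.length : Int) ∧
          k ∈ PySem.List.pyGetD (tg.map PySem.Set.ofList) ((n : Nat) : Int) PySem.Set.empty) := by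
        rintro ⟨h, _⟩
        exact hn (by exact_mod_cast h)
      have hgetA : PySem.List.pyGet? (pvR tg mov add extra) (n : Int) =
          some (extra.getD (n - tg.length) []) := by
        rw [pvR_get_right tg mov add extra n (by omega),
          List.getElem?_eq_getElem hmm, List.getD_eq_getElem?_getD,
          List.getElem?_eq_getElem hmm]
        rfl
      have hknew : k ∉ extra.getD (n - tg.length) [] := by
        rcases getD_mem_or extra (n - tg.length) [] with h | h
        · exact hnw _ h
        · rw [h]; exact List.not_mem_nil
      have hcast : ((n : Nat) : Int) - (tg.length : Int) = ((n - tg.length : Nat) : Int) := by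
        omega
      refine ⟨mov.set m (PySem.Set.add (mov.getD m PySem.Set.empty) k), add,
        extra.set (n - tg.length) (extra.getD (n - tg.length) [] ++ [k]),
        ?_, ?_, by simp [hrlen], halen, ?_⟩
      · rw [pvBStep_some, if_neg (by rw [not_and]; intro _; omega), if_pos hcond]
        rw [if_neg (show ¬ ((n : Nat) : Int) < (tg.length : Int) by omega)]
        have hgn : PySem.List.pyGet? extra (((n - tg.length : Nat) : Int)) =
            some (extra.getD (n - tg.length) []) := by
          rw [PySem.List.pyGet?_natCast, List.getElem?_eq_getElem hmm,
            List.getD_eq_getElem?_getD, List.getElem?_eq_getElem hmm]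
          rfl
        have hgr : PySem.List.pyGet? mov ((m : Nat) : Int) =
            some (mov.getD m PySem.Set.empty) := by
          rw [PySem.List.pyGet?_natCast,
            List.getElem?_eq_getElem (show m < mov.length by omega),
            List.getD_eq_getElem?_getD,
            List.getElem?_eq_getElem (show m < mov.length by omega)]
          rfl
        simp only [hcast, hgn, hclj, hgr, PySem.List.pySetD_natCast]
      · rw [pvAStepComp_some, if_neg (by rw [hlenR]; omega)]
        simp only [hgetA]
        rw [if_neg hknew]
        have hset : PySem.List.pySetD (pvR tg mov add extra) ((n : Nat) : Int)
            (extra.getD (n - tg.length) [] ++ [k]) =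
            pvR tg mov add (extra.set (n - tg.length) (extra.getD (n - tg.length) [] ++ [k])) :=
          pvR_set_right tg mov add extra n (extra.getD (n - tg.length) [] ++ [k]) (by omega)
        rw [hset]
        have h4 := pvARemove_render cl tg mov add
          (extra.set (n - tg.length) (extra.getD (n - tg.length) [] ++ [k])) k
          ((m : Nat) : Int) hclj (by exact_mod_cast Nat.zero_le m) hjlt hrlen
        rw [show ((m : Nat) : Int).toNat = m by simp] at h4
        exact h4 hc hrj
      · rintro k' hk' ⟨fr, fa, fn⟩
        refine ⟨?_, fa, ?_⟩
        · intro s hs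
          rcases List.mem_or_eq_of_mem_set hs with h | h
          · exact fr _ h
          · subst h
            simp only [PySem.Set.mem_add]
            rintro (h | rfl)
            · exact fr _ (getD_mem_or mov m PySem.Set.empty |>.resolve_right
                (fun he => by rw [he] at h; exact not_mem_set_empty k' h)) h
            · exact hk' rfl
        · intro l hl
          rcases List.mem_or_eq_of_mem_set hl with h | h
          · exact fn _ h
          · subst h
            simp only [List.mem_append, List.mem_singleton]
            rintro (h | rfl)
            · exact fn _ (getD_mem_or extra (n - tg.length) [] |>.resolve_right
                (fun he => by rw [he] at h; cases h)) h
            · exact hk' rfl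

theorem pvMain (grow : Bool) (cl : PySem.Dict String Int) (tg : List (List String))
    (L : List (String × Int)) :
    ∀ (mov : List (PySem.Set String)) (add extra : List (List String)),
    mov.length = tg.length → add.length = tg.length →
    (L.map (fun kv => kv.1)).Nodup →
    (∀ kv ∈ L, 0 ≤ kv.2 ∧ (grow = false → kv.2 < (tg.length : Int)) ∧
      (¬ (kv.2 < (tg.length : Int) ∧ kv.1 ∈ PySem.List.pyGetD tg kv.2 []) →
        ((cl.get? kv.1).isSome = true ∧ 0 ≤ (cl.get? kv.1).getD 0 ∧
          (cl.get? kv.1).getD 0 < (tg.length : Int) ∧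
          (PySem.List.pyGetD tg ((cl.get? kv.1).getD 0) []).count kv.1 = 1))) →
    (∀ kv ∈ L, pvFresh kv.1 mov add extra) →
    ∃ mov' add' extra',
      L.foldl (pvBStep grow (tg.length : Int) (tg.map PySem.Set.ofList) cl)
        (some (mov, add, extra)) = some (mov', add', extra') ∧
      L.foldl (fun acc kv => cond grow (pvAStepComp cl acc kv) (pvAStepAll cl acc kv))
        (some (pvR tg mov add extra)) = some (pvR tg mov' add' extra') := by
  induction L with
  | nil => exact fun mov add extra _ _ _ _ _ => ⟨mov, add, extra, rfl, rfl⟩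
  | cons kv L ih =>
    intro mov add extra hrlen halen hnd hpre hfr
    obtain ⟨k, i⟩ := kv
    obtain ⟨h0, hlt, hsrc⟩ := hpre (k, i) List.mem_cons_self
    have hfrk := hfr (k, i) List.mem_cons_self
    have hstep : ∃ mov1 add1 extra1,
        pvBStep grow (tg.length : Int) (tg.map PySem.Set.ofList) cl
          (some (mov, add, extra)) (k, i) = some (mov1, add1, extra1) ∧
        cond grow (pvAStepComp cl (some (pvR tg mov add extra)) (k, i))
          (pvAStepAll cl (some (pvR tg mov add extra)) (k, i)) = some (pvR tg mov1 add1 extra1) ∧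
        mov1.length = tg.length ∧ add1.length = tg.length ∧
        (∀ k', k' ≠ k → pvFresh k' mov add extra → pvFresh k' mov1 add1 extra1) := by
      cases grow with
      | false => exact pvStepAll_sim cl tg mov add extra k i hrlen halen h0 (hlt rfl) hsrc hfrk
      | true => exact pvStepComp_sim cl tg mov add extra k i hrlen halen h0 hsrc hfrk
    obtain ⟨mov1, add1, extra1, hB, hA, hrlen1, halen1, hpres⟩ := hstep
    have hnd' : (L.map (fun kv => kv.1)).Nodup := (List.nodup_cons.mp hnd).2
    have hkne : ∀ kv' ∈ L, kv'.1 ≠ k := by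
      intro kv' hkv' he
      exact (List.nodup_cons.mp hnd).1 (List.mem_map.mpr ⟨kv', hkv', he⟩)
    obtain ⟨mov', add', extra', hB', hA'⟩ := ih mov1 add1 extra1 hrlen1 halen1 hnd'
      (fun kv' h => hpre kv' (List.mem_cons_of_mem _ h))
      (fun kv' h => hpres kv'.1 (hkne kv' h) (hfr kv' (List.mem_cons_of_mem _ h)))
    refine ⟨mov', add', extra', ?_, ?_⟩
    · rw [List.foldl_cons, hB, hB']
    · rw [List.foldl_cons, hA, hA']

theorem pvInitFresh (tg : List (List String)) (k : String) :
    pvFresh k (tg.map (fun _ => PySem.Set.empty)) (tg.map (fun _ => [])) [] := by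
  refine ⟨?_, ?_, by simp⟩
  · intro s hs
    obtain ⟨_, _, rfl⟩ := List.mem_map.mp hs
    exact not_mem_set_empty k
  · intro l hl
    obtain ⟨_, _, rfl⟩ := List.mem_map.mp hl
    exact List.not_mem_nil

theorem pvNodupKeys (cc : List (String × Int)) :
    (((PySem.Dict.ofList cc).items).map (fun kv => kv.1)).Nodup := by
  have h := PySem.Dict.nodup_keys_ofList cc
  simpa [PySem.Dict.keys] using h

-- ===== VERDICT (by name: the statement is the Claim_ definition above) =====
theorem rearrange_topological_gen_spec : Claim_equal_rearrange_topological_gen := by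
  intro cc cl tg ft _ hpre
  unfold Spec_rearrange_topological_gen
  unfold rearrange_topological_gen rearrange_topological_gen_alt
  by_cases hft : ft = "all"
  · subst hft
    rw [if_pos rfl, if_neg (by simp)]
    have hpre' := hpre (Or.inl rfl)
    obtain ⟨mov', add', extra', hB, hA⟩ := pvMain (decide (("all" : String) = "component_only"))
      (PySem.Dict.ofList cl) tg ((PySem.Dict.ofList cc).items)
      (tg.map (fun _ => PySem.Set.empty)) (tg.map (fun _ => [])) []
      (by simp) (by simp) (pvNodupKeys cc)
      (by
        intro kv hkv
        obtain ⟨h0, hlt, hsrc⟩ := hpre' kv hkv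
        exact ⟨h0, fun _ => hlt rfl, hsrc⟩)
      (fun kv _ => pvInitFresh tg kv.1)
    rw [pvR_init] at hA
    have hA' : ((PySem.Dict.ofList cc).items).foldl
        (pvAStepAll (PySem.Dict.ofList cl)) (some tg) = some (pvR tg mov' add' extra') := hA
    rw [hA', hB]
    simp only [Option.getD_some]
    rw [pvRender_eq]
  · by_cases hft2 : ft = "component_only"
    · subst hft2
      rw [if_neg (by simp), if_pos rfl, if_neg (by simp)]
      have hpre' := hpre (Or.inr rfl)
      obtain ⟨mov', add', extra', hB, hA⟩ := pvMain
        (decide (("component_only" : String) = "component_only"))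
        (PySem.Dict.ofList cl) tg ((PySem.Dict.ofList cc).items)
        (tg.map (fun _ => PySem.Set.empty)) (tg.map (fun _ => [])) []
        (by simp) (by simp) (pvNodupKeys cc)
        (by
          intro kv hkv
          obtain ⟨h0, hlt, hsrc⟩ := hpre' kv hkv
          exact ⟨h0, fun h => absurd h (by simp), hsrc⟩)
        (fun kv _ => pvInitFresh tg kv.1)
      rw [pvR_init] at hA
      have hA' : ((PySem.Dict.ofList cc).items).foldl
          (pvAStepComp (PySem.Dict.ofList cl)) (some tg) = some (pvR tg mov' add' extra') := hA
      rw [hA', hB]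
      simp only [Option.getD_some]
      rw [pvRender_eq]
    · rw [if_neg hft, if_neg hft2, if_pos ⟨hft, hft2⟩]
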